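-- pv_equiv track=rewrite | github.com/kdb1217/Self_algorithm | 프로그래머스/lv1/92334. 신고 결과 받기/신고 결과 받기.py | solution
-- ===== SOURCE A (Python) =====
-- def solution(id_list, report, k):
--     answer = [0] * len(id_list)
--     arrcnt = {}
--     repcnt = {}
--     for i in range(len(id_list)):
--         arrcnt[id_list[i]] = 0
--         repcnt[id_list[i]] = []
--
--     processed_reports = set()
--
--     for r in report:
--         tmp = r.split(" ")
--         reporter = tmp[0]
--         reported = tmp[1]
--
--         if r in processed_reports:
--             continue
--
--         processed_reports.add(r)
--
--         if reported in arrcnt: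
--             arrcnt[reported] += 1
--             repcnt[reporter].append(reported)
--
--     for i in range(len(id_list)):
--         reported_users = repcnt[id_list[i]]
--         for user in reported_users:
--             if arrcnt[user] >= k:
--                 answer[i] += 1
--
--     return answer
-- ===== SOURCE B (Python) =====
-- def solution(id_list, report, k):
--     uniq = list(dict.fromkeys(report))
--     valid = [(rep, rpd)
--              for rep, rpd in ((r.split(" ")[0], r.split(" ")[1]) for r in uniq)
--              if rpd in id_list]
--     return [sum(1 for rep, rpd in valid
--                 if rep == i and sum(1 for _, d in valid if d == rpd) >= k)
--             for i in id_list]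
-- ===== Notes on version B (the rewrite author's own statement) =====
-- stated objective: alternative
-- what changed: B drops all of A's dicts (per-target counter, per-reporter grouping) and instead builds one deduplicated list of valid (reporter, reported) pairs and answers each id by a direct nested recount over that list (a report counts iff its reporter is the id and its target's occurrence count in the list reaches k).
-- crash fix: A raises KeyError when some well-formed report names a reported user in id_list but a reporter not in id_list (and IndexError on a report without a space, where B raises too); on the KeyError inputs B returns the normal answer, counting that report for nobody's row since no id matches the reporter. — e.g. on solution(["a"], ["b a"], 1): A raises KeyError, B returns [0]
import Mathlib
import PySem

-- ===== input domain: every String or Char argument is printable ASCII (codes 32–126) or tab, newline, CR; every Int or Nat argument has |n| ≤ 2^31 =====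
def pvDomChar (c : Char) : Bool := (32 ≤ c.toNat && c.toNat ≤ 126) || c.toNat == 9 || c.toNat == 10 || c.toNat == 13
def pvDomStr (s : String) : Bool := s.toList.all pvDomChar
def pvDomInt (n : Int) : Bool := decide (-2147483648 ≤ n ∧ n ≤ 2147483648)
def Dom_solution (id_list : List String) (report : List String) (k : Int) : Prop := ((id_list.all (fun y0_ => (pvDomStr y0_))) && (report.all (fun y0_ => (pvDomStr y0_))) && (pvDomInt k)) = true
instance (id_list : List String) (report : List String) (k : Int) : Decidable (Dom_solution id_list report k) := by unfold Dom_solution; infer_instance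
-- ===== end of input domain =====

-- B replaces A's dict machinery (per-target counter, per-reporter grouping, indexed answer
-- updates) by one deduplicated valid-pair list answered per id by direct nested recounts
-- (alternative decomposition; dict-free but quadratic, not faster).


-- ===== PORT A =====
-- transliteration of A; where Python A raises (IndexError on a spaceless report,
-- KeyError on a reporter with no row) the total port defaults — those inputs are outside Pre_.
def solution (id_list : List String) (report : List String) (k : Int) : List Int :=
  let answer : List Int := List.replicate id_list.length 0
  let init :=
    id_list.foldl
      (fun (st : PySem.Dict String Int × PySem.Dict String (List String)) idv =>
        (st.1.insert idv 0, st.2.insert idv []))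
      (PySem.Dict.empty, PySem.Dict.empty)
  let st :=
    report.foldl
      (fun (st : PySem.Set String × PySem.Dict String Int × PySem.Dict String (List String)) r =>
        let tmp := ((PySem.Str.split? r " ").getD [])
        let reporter := (PySem.List.pyGet? tmp 0).getD ""
        let reported := (PySem.List.pyGet? tmp 1).getD ""
        if PySem.Set.contains st.1 r then st
        else
          let processed := PySem.Set.add st.1 r
          if st.2.1.contains reported then
            (processed, st.2.1.modify reported 0 (· + 1),
             st.2.2.modify reporter [] (· ++ [reported]))
          else (processed, st.2.1, st.2.2))
      (PySem.Set.empty, init.1, init.2)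
  (PySem.List.pyRange 0 (PySem.List.len id_list) 1).foldl
    (fun ans i =>
      let reported_users := st.2.2.getD (PySem.List.pyGetD id_list i "") []
      reported_users.foldl
        (fun ans u =>
          if k ≤ st.2.1.getD u 0 then
            PySem.List.pySetD ans i (PySem.List.pyGetD ans i 0 + 1)
          else ans)
        ans)
    answer

-- ===== PORT B =====
-- dict-free: deduplicate, keep valid (reporter, reported) pairs, answer each id by recounting
def solution_alt (id_list : List String) (report : List String) (k : Int) : List Int :=
  let uniq := PySem.Set.ofList report
  let valid :=
    (uniq.map (fun r =>
        ((PySem.List.pyGet? ((PySem.Str.split? r " ").getD []) 0).getD "",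
         (PySem.List.pyGet? ((PySem.Str.split? r " ").getD []) 1).getD ""))).filter
      (fun p => id_list.contains p.2)
  id_list.map (fun i =>
    ((valid.countP (fun p =>
        p.1 == i && decide (k ≤ ((valid.countP (fun q => q.2 == p.2)) : Int)))) : Int))

-- ===== PRECONDITION & SPEC =====
-- Pre_ excludes exactly the inputs where Python A raises: a report without a space
-- (IndexError at tmp[1]) or a report whose reported user is an id but whose reporter is
-- not (KeyError at repcnt[reporter]).
def Pre_solution (id_list : List String) (report : List String) (k : Int) : Prop :=
  ∀ r ∈ report, 2 ≤ ((PySem.Str.split? r " ").getD []).length ∧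
    (((PySem.List.pyGet? ((PySem.Str.split? r " ").getD []) 1).getD "") ∈ id_list →
     ((PySem.List.pyGet? ((PySem.Str.split? r " ").getD []) 0).getD "") ∈ id_list)
instance (id_list : List String) (report : List String) (k : Int) : Decidable (Pre_solution id_list report k) := by unfold Pre_solution; infer_instance

def pvWitness_solution : List String × List String × Int := (["a", "b"], ["a b", "b a"], 1)

-- On inputs where every report splits in two but some report's reported user is an id while
-- its reporter is not, Python A raises KeyError; B returns the answer in which that report
-- counts for nobody's row.
def Raises_solution (id_list : List String) (report : List String) (k : Int) : Prop :=
  (∀ r ∈ report, 2 ≤ ((PySem.Str.split? r " ").getD []).length) ∧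
  (∃ r ∈ report, ((PySem.List.pyGet? ((PySem.Str.split? r " ").getD []) 1).getD "") ∈ id_list ∧
    ((PySem.List.pyGet? ((PySem.Str.split? r " ").getD []) 0).getD "") ∉ id_list)
instance (id_list : List String) (report : List String) (k : Int) : Decidable (Raises_solution id_list report k) := by unfold Raises_solution; infer_instance
def pvRaiseWitness_solution : List String × List String × Int := (["a"], ["b a"], 1)
def pvRaiseWitnessOut_solution : List Int := [0]

def Spec_solution (id_list : List String) (report : List String) (k : Int) (out : List Int) : Prop := out = solution_alt id_list report k
instance (id_list : List String) (report : List String) (k : Int) (out : List Int) : Decidable (Spec_solution id_list report k out) := by unfold Spec_solution; infer_instance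

-- ===== CLAIM (what is proved, stated in full; the proofs are below) =====
def Claim_equal_solution : Prop := ∀ (id_list : List String) (report : List String) (k : Int), Dom_solution id_list report k → Pre_solution id_list report k → Spec_solution id_list report k (solution id_list report k)
def Claim_raises_solution : Prop := (∀ (id_list : List String) (report : List String) (k : Int), Dom_solution id_list report k → Raises_solution id_list report k → ¬ Pre_solution id_list report k) ∧ (Dom_solution (pvRaiseWitness_solution.1) (pvRaiseWitness_solution.2.1) (pvRaiseWitness_solution.2.2) ∧ Raises_solution (pvRaiseWitness_solution.1) (pvRaiseWitness_solution.2.1) (pvRaiseWitness_solution.2.2) ∧ solution_alt (pvRaiseWitness_solution.1) (pvRaiseWitness_solution.2.1) (pvRaiseWitness_solution.2.2) = pvRaiseWitnessOut_solution)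

-- ===== LEMMAS AND PROOFS =====

-- A's loop skips report strings already seen: a guarded fold over the raw list is an
-- unguarded fold over the deduplicated list
theorem pv_foldl_dedup {σ : Type} (g : σ → String → σ) (l : List String) :
    ∀ (s : PySem.Set String) (x : σ),
    l.foldl (fun st r => if PySem.Set.contains st.1 r then st else (PySem.Set.add st.1 r, g st.2 r)) (s, x)
    = (PySem.Set.update s l,
       ((PySem.Set.ofList l).filter (fun r => !(PySem.Set.contains s r))).foldl g x) := by
  induction l using List.reverseRecOn with
  | nil => intro s x; simp [PySem.Set.update_nil, PySem.Set.ofList_nil]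
  | append_singleton l r ih =>
    intro s x
    rw [List.foldl_append, ih]
    simp only [List.foldl_cons, List.foldl_nil]
    rw [PySem.Set.update_append, PySem.Set.update_cons, PySem.Set.update_nil]
    rw [PySem.Set.ofList_append_singleton]
    by_cases hrl : r ∈ l
    · have h1 : PySem.Set.contains (PySem.Set.update s l) r = true := by
        simp [PySem.Set.mem_update, hrl]
      have h2 : PySem.Set.add (PySem.Set.ofList l) r = PySem.Set.ofList l :=
        PySem.Set.add_of_mem (by simp [PySem.Set.mem_ofList, hrl])
      rw [h1, h2]
      simp [PySem.Set.add_of_mem, PySem.Set.mem_update, hrl]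
    · have h2 : PySem.Set.add (PySem.Set.ofList l) r = PySem.Set.ofList l ++ [r] :=
        PySem.Set.add_of_not_mem (by simp [PySem.Set.mem_ofList, hrl])
      rw [h2, List.filter_append]
      by_cases hrs : r ∈ s
      · have h1 : PySem.Set.contains (PySem.Set.update s l) r = true := by
          simp [PySem.Set.mem_update, hrs]
        rw [h1]
        simp [PySem.Set.add_of_mem, PySem.Set.mem_update, hrs]
      · have h1 : PySem.Set.contains (PySem.Set.update s l) r = false := by
          simp [PySem.Set.mem_update, hrs, hrl]
        rw [h1]
        simp [PySem.Set.add_of_not_mem, PySem.Set.mem_update, hrs, hrl]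

-- A's combined per-report step: the stateful membership test is the fixed test
-- 'reported ∈ id_list', and the pair state splits into two filtered folds
theorem pv_condA (id_list : List String) (rep rpd : String → String) (rs : List String) :
    ∀ (a : PySem.Dict String Int) (rc : PySem.Dict String (List String)),
    (∀ u, a.contains u = decide (u ∈ id_list)) →
    rs.foldl (fun st r =>
        if st.1.contains (rpd r) then
          (st.1.modify (rpd r) 0 (· + 1), st.2.modify (rep r) [] (· ++ [rpd r]))
        else st)
      (a, rc)
    = ((rs.filter (fun r => decide (rpd r ∈ id_list))).foldl (fun d r => d.modify (rpd r) 0 (· + 1)) a,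
       (rs.filter (fun r => decide (rpd r ∈ id_list))).foldl (fun d r => d.modify (rep r) [] (· ++ [rpd r])) rc) := by
  induction rs with
  | nil => intro a rc h; simp
  | cons r rs ih =>
    intro a rc h
    simp only [List.foldl_cons, List.filter_cons, h (rpd r)]
    by_cases hm : rpd r ∈ id_list
    · simp only [hm, decide_true, if_true]
      refine ih _ _ (fun u => ?_)
      rw [PySem.Dict.contains_modify]
      by_cases hu : u = rpd r
      · subst hu; simp [hm]
      · simp [hu, h u]
    · simp only [hm, decide_false]
      exact ih _ _ h

-- the id-initialisation loop: membership and default values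
theorem pv_contains_init (id_list : List String) :
    ∀ u, (id_list.foldl (fun (d : PySem.Dict String Int) idv => d.insert idv 0) PySem.Dict.empty).contains u
      = decide (u ∈ id_list) := by
  intro u
  rw [PySem.Dict.contains_eq_decide_mem_keys, PySem.Dict.keys_foldl_insert, PySem.Dict.keys_empty]
  simp [PySem.Set.mem_update]

theorem pv_getD_init_zero (id_list : List String) :
    ∀ u, (id_list.foldl (fun (d : PySem.Dict String Int) idv => d.insert idv 0) PySem.Dict.empty).getD u 0 = 0 := by
  suffices h : ∀ (l : List String) (d : PySem.Dict String Int), (∀ u, d.getD u 0 = 0) →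
      ∀ u, (l.foldl (fun d idv => d.insert idv 0) d).getD u 0 = 0 by
    exact h id_list _ (fun u => by simp [PySem.Dict.getD_empty])
  intro l
  induction l with
  | nil => intro d h u; simpa using h u
  | cons x l ih =>
    intro d h u
    refine ih _ (fun v => ?_) u
    rw [PySem.Dict.getD_insert]
    split <;> simp [h]

theorem pv_getD_init_nil (id_list : List String) :
    ∀ u, (id_list.foldl (fun (d : PySem.Dict String (List String)) idv => d.insert idv []) PySem.Dict.empty).getD u [] = [] := by
  suffices h : ∀ (l : List String) (d : PySem.Dict String (List String)), (∀ u, d.getD u [] = []) →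
      ∀ u, (l.foldl (fun d idv => d.insert idv []) d).getD u [] = [] by
    exact h id_list _ (fun u => by simp [PySem.Dict.getD_empty])
  intro l
  induction l with
  | nil => intro d h u; simpa using h u
  | cons x l ih =>
    intro d h u
    refine ih _ (fun v => ?_) u
    rw [PySem.Dict.getD_insert]
    split <;> simp [h]

-- counting/grouping folds, keyed through a function
theorem pv_getD_modify_inc (rpd : String → String) :
    ∀ (l : List String) (d : PySem.Dict String Int) (u : String),
    (l.foldl (fun d r => d.modify (rpd r) 0 (· + 1)) d).getD u 0
    = d.getD u 0 + ((l.map rpd).count u : Int) := by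
  intro l
  induction l with
  | nil => intro d u; simp
  | cons r l ih =>
    intro d u
    simp only [List.foldl_cons, List.map_cons, List.count_cons, ih]
    rw [PySem.Dict.getD_modify]
    by_cases hu : u = rpd r
    · simp [hu]; ring
    · simp [hu, Ne.symm hu]

theorem pv_getD_modify_app (rep rpd : String → String) :
    ∀ (l : List String) (d : PySem.Dict String (List String)) (c : String),
    (l.foldl (fun d r => d.modify (rep r) [] (· ++ [rpd r])) d).getD c []
    = d.getD c [] ++ ((l.map (fun r => (rep r, rpd r))).filter (fun p => p.1 == c)).map (·.2) := by
  intro l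
  induction l with
  | nil => intro d c; simp
  | cons r l ih =>
    intro d c
    simp only [List.foldl_cons, List.map_cons, List.filter_cons, ih]
    rw [PySem.Dict.getD_modify]
    by_cases hc : c = rep r
    · simp [hc]
    · simp [hc, Ne.symm hc]

-- A's inner answer loop touches one index
theorem pv_inner (p : String → Prop) [DecidablePred p] (i : Nat) :
    ∀ (l : List String) (ans : List Int),
    l.foldl (fun ans u => if p u then ans.set i (ans.getD i 0 + 1) else ans) ans
    = ans.set i (ans.getD i 0 + (l.countP (fun u => decide (p u)) : Int)) := by
  intro l
  induction l with
  | nil =>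
    intro ans
    by_cases hi : i < ans.length
    · rw [List.countP_nil]
      rw [List.getD_eq_getElem _ _ hi]
      simp [List.set_getElem_self hi]
    · rw [List.set_eq_of_length_le (by omega)]
      simp
  | cons u l ih =>
    intro ans
    simp only [List.foldl_cons, List.countP_cons]
    by_cases hq : p u
    · rw [if_pos hq, ih]
      by_cases hi : i < ans.length
      · have hi' : i < (ans.set i (ans.getD i 0 + 1)).length := by simpa using hi
        rw [List.getD_eq_getElem _ _ hi', List.getElem_set_self hi', List.set_set]
        congr 1
        simp [hq]
        ring
      · rw [List.set_eq_of_length_le (show ans.length ≤ i by omega)]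
        rw [List.set_eq_of_length_le (by omega), List.set_eq_of_length_le (by omega)]
    · rw [if_neg hq, ih]
      simp [hq]

-- A's outer answer loop: one set per index
theorem pv_outer (v : Nat → Int) :
    ∀ (n : Nat) (ans : List Int), n ≤ ans.length →
    (List.range n).foldl (fun ans i => ans.set i (ans.getD i 0 + v i)) ans
    = (List.range n).map (fun i => ans.getD i 0 + v i) ++ ans.drop n := by
  intro n
  induction n with
  | zero => intro ans h; simp
  | succ n ih =>
    intro ans h
    rw [List.range_succ, List.foldl_append, ih ans (by omega)]
    simp only [List.foldl_cons, List.foldl_nil, List.map_append, List.map_cons, List.map_nil]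
    have hlenpre : ((List.range n).map (fun i => ans.getD i 0 + v i)).length = n := by simp
    have hdrop : ans.drop n = ans[n] :: ans.drop (n + 1) := List.drop_eq_getElem_cons (by omega)
    rw [List.set_append, hlenpre, if_neg (by omega)]
    rw [List.getD_append_right _ _ _ _ (by omega), hlenpre, Nat.sub_self]
    simp only [List.getD_eq_getElem _ _ (show n < ans.length by omega), List.append_assoc,
      List.cons_append, List.nil_append]
    rw [hdrop]
    rfl

theorem pv_outer_replicate (v : Nat → Int) (n : Nat) :
    (List.range n).foldl (fun ans i => ans.set i (ans.getD i 0 + v i)) (List.replicate n 0)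
    = (List.range n).map v := by
  rw [pv_outer v n (List.replicate n 0) (by simp)]
  simp [List.getD_eq_getElem?_getD, List.getElem?_replicate]
  intro a ha
  simp [ha]

-- a map over a list is a map over its index range
theorem pv_map_eq_range_map {β : Type} (l : List String) (f : String → β) (d : String) :
    l.map f = (List.range l.length).map (fun i => f (l.getD i d)) := by
  apply List.ext_getElem
  · simp
  · intro i h1 h2
    have hi : i < l.length := by simpa using h1
    simp [List.getElem?_eq_getElem hi]

-- filtering a mapped list is mapping the filtered list
theorem pv_filter_of_map {α β : Type} (f : α → β) (q : β → Bool) (l : List α) :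
    (l.map f).filter q = (l.filter (fun a => q (f a))).map f := by
  induction l with
  | nil => simp
  | cons a l ih =>
    simp only [List.map_cons, List.filter_cons]
    by_cases h : q (f a) <;> simp [h, ih]

-- the split fields of a report string
def pvRep (r : String) : String := (PySem.List.pyGet? ((PySem.Str.split? r " ").getD []) 0).getD ""
def pvRpd (r : String) : String := (PySem.List.pyGet? ((PySem.Str.split? r " ").getD []) 1).getD ""

-- ===== VERDICT (by name: the statement is the Claim_ definition above) =====
theorem solution_spec : Claim_equal_solution := by
  intro id_list report k _ _
  unfold Spec_solution
  simp only [solution, solution_alt]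
  rw [PySem.List.foldl_prod_mk (f := fun (d : PySem.Dict String Int) idv => d.insert idv 0)
    (g := fun (d : PySem.Dict String (List String)) idv => d.insert idv [])]
  have hA : (fun (st : PySem.Set String × PySem.Dict String Int × PySem.Dict String (List String)) r =>
      if PySem.Set.contains st.1 r then st
      else
        if st.2.1.contains ((PySem.List.pyGet? ((PySem.Str.split? r " ").getD []) 1).getD "") then
          (PySem.Set.add st.1 r,
            st.2.1.modify ((PySem.List.pyGet? ((PySem.Str.split? r " ").getD []) 1).getD "") 0 (· + 1),
            st.2.2.modify ((PySem.List.pyGet? ((PySem.Str.split? r " ").getD []) 0).getD "") []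
              (· ++ [(PySem.List.pyGet? ((PySem.Str.split? r " ").getD []) 1).getD ""]))
        else (PySem.Set.add st.1 r, st.2.1, st.2.2))
      = (fun st r =>
        if PySem.Set.contains st.1 r then st
        else (PySem.Set.add st.1 r,
          (fun (x : PySem.Dict String Int × PySem.Dict String (List String)) r =>
            if x.1.contains (pvRpd r) then
              (x.1.modify (pvRpd r) 0 (· + 1), x.2.modify (pvRep r) [] (· ++ [pvRpd r]))
            else x) st.2 r)) := by
    funext st r
    by_cases h1 : r ∈ st.1
    · simp [h1]
    · simp only [pvRep, pvRpd]
      simp [h1]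
      try (split <;> rfl)
  rw [hA, pv_foldl_dedup (g := (fun (x : PySem.Dict String Int × PySem.Dict String (List String)) r =>
    if x.1.contains (pvRpd r) then
      (x.1.modify (pvRpd r) 0 (· + 1), x.2.modify (pvRep r) [] (· ++ [pvRpd r]))
    else x))]
  have hfilter : (PySem.Set.ofList report).filter (fun r => !(PySem.Set.contains PySem.Set.empty r))
      = PySem.Set.ofList report := by
    simp [PySem.Set.empty]
  rw [hfilter]
  dsimp only
  rw [pv_condA id_list pvRep pvRpd (PySem.Set.ofList report) _ _ (fun u => pv_contains_init id_list u)]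
  dsimp only
  simp only [PySem.List.len_eq]
  rw [PySem.List.pyRange_one]
  simp only [sub_zero, Int.toNat_natCast]
  rw [List.foldl_map]
  simp only [zero_add, PySem.List.pyGetD_natCast, PySem.List.pySetD_natCast]
  simp only [pv_inner]
  rw [pv_outer_replicate]
  -- B side: rewrite valid as a map of the filtered deduplicated reports
  have hvalid : ((PySem.Set.ofList report).map (fun r => (pvRep r, pvRpd r))).filter
        (fun p => id_list.contains p.2)
      = ((PySem.Set.ofList report).filter (fun r => decide (pvRpd r ∈ id_list))).map
        (fun r => (pvRep r, pvRpd r)) := by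
    rw [pv_filter_of_map]
    congr 1
    apply List.filter_congr
    intro r _
    simp
  simp only [pvRep, pvRpd] at hvalid
  rw [hvalid]
  rw [pv_map_eq_range_map id_list _ ""]
  apply List.map_congr_left
  intro i hi
  rw [pv_getD_modify_app pvRep pvRpd, pv_getD_init_nil id_list, List.nil_append]
  simp only [List.countP_map, List.countP_filter, Function.comp_def]
  congr 1
  apply List.countP_congr
  intro r hr
  dsimp only
  rw [pv_getD_modify_inc pvRpd, pv_getD_init_zero, zero_add]
  rw [List.count_eq_countP, List.countP_map, List.countP_filter]
  simp only [Function.comp_def, pvRep, pvRpd, Bool.and_eq_true, decide_eq_true_eq, beq_iff_eq]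
  tauto

@[simp]
theorem solution_raises : Claim_raises_solution := by
  unfold Claim_raises_solution
  refine ⟨?_, by decide⟩
  rintro id_list report k _ ⟨hwf, r, hr, h1, h0⟩ hpre
  exact h0 ((hpre r hr).2 h1)
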